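-- pv_equiv track=rewrite | github.com/match9393/ContextForge | backend/app/ask_service.py | _filter_off_topic_query_variants
-- ===== SOURCE A (Python) =====
-- def _filter_off_topic_query_variants(question: str, queries: list[str]) -> list[str]:
--     q = question.lower()
--     blocked_terms = {
--         "pip",
--         "conda",
--         "poetry",
--         "venv",
--         "npm",
--         "yarn",
--         "maven",
--         "gradle",
--         "python",
--         "node.js",
--         "java",
--     }
--
--     filtered: list[str] = []
--     for query in queries:
--         lower = query.lower()
--         if any(term in lower for term in blocked_terms) and not any(term in q for term in blocked_terms):
--             continue
--         filtered.append(query)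
--
--     if not filtered:
--         return [question]
--     return filtered
-- ===== SOURCE B (Python) =====
-- _BLOCKED = ("pip", "conda", "poetry", "venv", "npm", "yarn", "maven",
--             "gradle", "python", "node.js", "java")
--
-- # First-character index: bucket the blocked terms by their first letter so the
-- # positional scan only tests terms that can possibly start at a position.
-- _BY_FIRST: dict = {}
-- for _t in _BLOCKED:
--     _BY_FIRST.setdefault(_t[0], []).append(_t)
--
--
-- def _is_off_topic(text: str) -> bool:
--     # Single left-to-right scan of the lowered text: at each position, test
--     # whether a blocked term starting with that character is a prefix there.
--     s = text.lower()
--     return any(s.startswith(term, i)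
--                for i in range(len(s))
--                for term in _BY_FIRST.get(s[i], ()))
--
--
-- def _filter_off_topic_query_variants(question: str, queries: list[str]) -> list[str]:
--     # If the question itself is off-topic, nothing is filtered.
--     kept = (list(queries) if _is_off_topic(question)
--             else [q for q in queries if not _is_off_topic(q)])
--     return kept or [question]
-- ===== Notes on version B (the rewrite author's own statement) =====
-- stated objective: alternative
-- what changed: B replaces A's per-term substring searches (term in lower, rescanning the question inside every loop iteration) with a position-based multi-pattern scan over a first-character bucket index of the blocked terms: one pass over each lowered string testing, at each index, only the terms bucketed under that character via startswith(term, i), with the question's scan hoisted into a single top-level branch and a shared 'or [question]' fallback.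
import Mathlib
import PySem

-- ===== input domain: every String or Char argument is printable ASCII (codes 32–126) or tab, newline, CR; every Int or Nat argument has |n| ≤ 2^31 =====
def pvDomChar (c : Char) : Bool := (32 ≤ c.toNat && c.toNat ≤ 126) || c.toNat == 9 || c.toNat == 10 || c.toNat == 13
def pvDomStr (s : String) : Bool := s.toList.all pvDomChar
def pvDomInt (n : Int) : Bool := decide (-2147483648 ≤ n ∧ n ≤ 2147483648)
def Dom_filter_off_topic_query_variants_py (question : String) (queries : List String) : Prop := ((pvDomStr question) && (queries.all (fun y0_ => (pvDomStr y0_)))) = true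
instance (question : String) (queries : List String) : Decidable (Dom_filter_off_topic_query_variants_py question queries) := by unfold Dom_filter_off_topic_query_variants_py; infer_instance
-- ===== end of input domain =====

-- B replaces A's per-term substring searches with one position-based multi-pattern scan per string (prefix test at each index) and hoists the question's scan into a single top-level branch.
-- ===== PORT A =====
-- Python's blocked_terms set literal: distinct string literals, iteration only feeds `any`, ported as the list of its elements.
def pvBlockedA : List String :=
  ["pip", "conda", "poetry", "venv", "npm", "yarn", "maven", "gradle", "python", "node.js", "java"]

def filter_off_topic_query_variants_py (question : String) (queries : List String) : List String :=
  let q := PySem.Str.lower question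
  let filtered := queries.foldl (fun acc query =>
    let lower := PySem.Str.lower query
    if (pvBlockedA.any (fun term => PySem.Str.isIn term lower)) &&
       !(pvBlockedA.any (fun term => PySem.Str.isIn term q)) then acc
    else acc ++ [query]) []
  if filtered = [] then [question] else filtered

-- ===== PORT B =====
def pvBlockedB : List String :=
  ["pip", "conda", "poetry", "venv", "npm", "yarn", "maven", "gradle", "python", "node.js", "java"]

-- Source B's module-level bucket build: for t in _BLOCKED: _BY_FIRST.setdefault(t[0], []).append(t)
-- (every term is nonempty, so t[0] is exactly toList.headD).
def pvByFirst : PySem.Dict Char (List String) :=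
  pvBlockedB.foldl (fun d t =>
    d.insert (t.toList.headD ' ') ((d.getD (t.toList.headD ' ') []) ++ [t])) PySem.Dict.empty

-- Source B's _is_off_topic: scan positions 0..len(s)-1 of the lowered text, testing only the
-- bucket of s[i] (i < len(s), so List.getD is exactly Python's s[i]); Python's
-- s.startswith(term, i) with 0 ≤ i is exactly the prefix test on s[i:] (= drop i).
def pvIsOffTopic (text : String) : Bool :=
  let s := PySem.Chars.lower text.toList
  (List.range s.length).any (fun i =>
    (pvByFirst.getD (s.getD i ' ') []).any (fun term =>
      PySem.Chars.startswith (s.drop i) term.toList))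

def filter_off_topic_query_variants_py_alt (question : String) (queries : List String) : List String :=
  let kept :=
    if pvIsOffTopic question then queries
    else queries.filter (fun q => !(pvIsOffTopic q))
  if kept = [] then [question] else kept

-- ===== PRECONDITION & SPEC =====
def Spec_filter_off_topic_query_variants_py (question : String) (queries : List String) (out : List String) : Prop := out = filter_off_topic_query_variants_py_alt question queries
instance (question : String) (queries : List String) (out : List String) : Decidable (Spec_filter_off_topic_query_variants_py question queries out) := by unfold Spec_filter_off_topic_query_variants_py; infer_instance

-- ===== CLAIM (what is proved, stated in full; the proofs are below) =====
def Claim_equal_filter_off_topic_query_variants_py : Prop := ∀ (question : String) (queries : List String), Dom_filter_off_topic_query_variants_py question queries → Spec_filter_off_topic_query_variants_py question queries (filter_off_topic_query_variants_py question queries)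

-- ===== LEMMAS AND PROOFS =====

-- For a nonempty pattern, "some position < len where it is a prefix of the suffix"
-- is exactly substring membership (positions ≥ len can only host the empty pattern).
theorem pv_scan_term_eq (cs sub : List Char) (hsub : sub ≠ []) :
    ((List.range cs.length).any (fun i => PySem.Chars.startswith (cs.drop i) sub)) =
    PySem.Chars.isIn sub cs := by
  rw [Bool.eq_iff_iff, List.any_eq_true, ← PySem.Chars.exists_prefix_drop_iff_isIn]
  constructor
  · rintro ⟨i, -, h⟩
    exact ⟨i, (PySem.Chars.startswith_iff _ _).1 h⟩
  · rintro ⟨j, h⟩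
    by_cases hj : j < cs.length
    · exact ⟨j, List.mem_range.2 hj, (PySem.Chars.startswith_iff _ _).2 h⟩
    · rw [List.drop_eq_nil_of_le (le_of_not_gt hj)] at h
      exact absurd (List.prefix_nil.1 h) hsub

-- The bucket table, evaluated.
theorem pv_byFirst_lit : pvByFirst = PySem.Dict.mk
    [('p', ["pip", "poetry", "python"]), ('c', ["conda"]), ('v', ["venv"]),
     ('n', ["npm", "node.js"]), ('y', ["yarn"]), ('m', ["maven"]),
     ('g', ["gradle"]), ('j', ["java"])] := by decide

-- Every bucket entry is a blocked term whose first character is the key.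
theorem pv_bucket_mem (c : Char) (t : String) (ht : t ∈ pvByFirst.getD c []) :
    t ∈ pvBlockedB ∧ t.toList.headD ' ' = c := by
  rw [pv_byFirst_lit] at ht
  simp only [PySem.Dict.getD, PySem.Dict.get?_mk_cons] at ht
  split_ifs at ht with h1 h2 h3 h4 h5 h6 h7 h8
  · rw [beq_iff_eq] at h1; subst h1; simp only [Option.getD_some] at ht; fin_cases ht <;> decide
  · rw [beq_iff_eq] at h2; subst h2; simp only [Option.getD_some] at ht; fin_cases ht <;> decide
  · rw [beq_iff_eq] at h3; subst h3; simp only [Option.getD_some] at ht; fin_cases ht <;> decide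
  · rw [beq_iff_eq] at h4; subst h4; simp only [Option.getD_some] at ht; fin_cases ht <;> decide
  · rw [beq_iff_eq] at h5; subst h5; simp only [Option.getD_some] at ht; fin_cases ht <;> decide
  · rw [beq_iff_eq] at h6; subst h6; simp only [Option.getD_some] at ht; fin_cases ht <;> decide
  · rw [beq_iff_eq] at h7; subst h7; simp only [Option.getD_some] at ht; fin_cases ht <;> decide
  · rw [beq_iff_eq] at h8; subst h8; simp only [Option.getD_some] at ht; fin_cases ht <;> decide
  · simp [PySem.Dict.get?] at ht

-- Every blocked term sits in the bucket of its first character.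
theorem pv_bucket_mem_of (t : String) (ht : t ∈ pvBlockedB) :
    t ∈ pvByFirst.getD (t.toList.headD ' ') [] := by
  fin_cases ht <;> decide

-- A nonempty prefix of the suffix at i fixes the character at i.
theorem pv_prefix_head (s t : List Char) (i : Nat) (hne : t ≠ []) (hi : i < s.length)
    (hpref : t <+: s.drop i) : t.headD ' ' = s.getD i ' ' := by
  obtain ⟨u, hu⟩ := hpref
  cases t with
  | nil => exact absurd rfl hne
  | cons a t' =>
    have h1 : (s.drop i).head? = some a := by rw [← hu]; simp
    rw [List.head?_drop] at h1
    rw [List.getD_eq_getElem?_getD, h1]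
    simp

-- B's bucketed positional scan decides the same predicate as A's per-term substring tests.
theorem pv_offtopic_eq (s : String) :
    pvBlockedA.any (fun term => PySem.Str.isIn term (PySem.Str.lower s)) = pvIsOffTopic s := by
  unfold pvIsOffTopic
  rw [Bool.eq_iff_iff, List.any_eq_true, List.any_eq_true]
  constructor
  · rintro ⟨t, ht, h⟩
    have htB : t ∈ pvBlockedB := by simpa [pvBlockedB, pvBlockedA] using ht
    have hne : t.toList ≠ [] := by fin_cases htB <;> decide
    simp only [PySem.Str.isIn_eq, PySem.Str.toList_lower] at h
    rw [← pv_scan_term_eq _ _ hne] at h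
    rcases List.any_eq_true.1 h with ⟨i, hi, hpref⟩
    refine ⟨i, hi, List.any_eq_true.2 ⟨t, ?_, hpref⟩⟩
    rw [← pv_prefix_head (PySem.Chars.lower s.toList) t.toList i hne (List.mem_range.1 hi)
        ((PySem.Chars.startswith_iff _ _).1 hpref)]
    exact pv_bucket_mem_of t htB
  · rintro ⟨i, hi, h⟩
    rcases List.any_eq_true.1 h with ⟨t, ht, hpref⟩
    obtain ⟨htB, -⟩ := pv_bucket_mem _ _ ht
    have hne : t.toList ≠ [] := by fin_cases htB <;> decide
    refine ⟨t, by simpa [pvBlockedB, pvBlockedA] using htB, ?_⟩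
    simp only [PySem.Str.isIn_eq, PySem.Str.toList_lower]
    rw [← pv_scan_term_eq _ _ hne]
    exact List.any_eq_true.2 ⟨i, hi, hpref⟩

-- A's accumulate-with-skip loop, with the loop-invariant question test b abstracted:
-- the whole list when b is true, a filter when b is false.
theorem pv_foldl_skip_eq (b : Bool) (p : String → Bool) (qs : List String) :
    qs.foldl (fun acc x => if (p x && !b) = true then acc else acc ++ [x]) [] =
    (if b = true then qs else qs.filter (fun x => !(p x))) := by
  cases b
  · simp only [Bool.not_false, Bool.and_true, Bool.false_eq_true, if_false]
    rw [show (fun (acc : List String) (x : String) =>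
          if (p x) = true then acc else acc ++ [x]) =
        (fun (acc : List String) (x : String) =>
          if (!(p x)) = true then acc ++ [x] else acc) from by
        funext acc x; cases p x <;> simp]
    exact PySem.List.foldl_append_if_eq_filter _ _ _
  · simp only [Bool.not_true, Bool.and_false, Bool.false_eq_true, if_false, if_true,
      PySem.List.foldl_append_singleton_eq_self, List.nil_append]

-- ===== VERDICT (by name: the statement is the Claim_ definition above) =====
theorem filter_off_topic_query_variants_py_spec : Claim_equal_filter_off_topic_query_variants_py := by
  intro question queries _
  unfold Spec_filter_off_topic_query_variants_py
  unfold filter_off_topic_query_variants_py filter_off_topic_query_variants_py_alt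
  simp only [pv_offtopic_eq]
  rw [pv_foldl_skip_eq (pvIsOffTopic question) pvIsOffTopic queries]
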